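-- pv_equiv track=rewrite | github.com/kushalthaman/tex-to-tb-xls | syllabary_obolo.py | coda
-- ===== SOURCE A (Python) =====
-- def coda(syl):
--     result = ''
--     for char in syl[::-1]:
--         if char not in "aeiouɔ":
--             result = char + result
--         else:
--             break
--
--     if result == syl:
--         return ''
--
--     return result
-- ===== SOURCE B (Python) =====
-- def coda(syl):
--     last_vowel = -1
--     for i, ch in enumerate(syl):
--         if ch in "aeiouɔ":
--             last_vowel = i
--     if last_vowel == -1:
--         return ''
--     return syl[last_vowel + 1:]
-- ===== Notes on version B (the rewrite author's own statement) =====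
-- stated objective: alternative
-- what changed: Replaces A's backward scan that builds up the consonant suffix string and compares it to the whole syllable with a single forward enumerate pass that only tracks the index of the last vowel, then returns one slice (or '' when no vowel was seen).
import Mathlib
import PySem

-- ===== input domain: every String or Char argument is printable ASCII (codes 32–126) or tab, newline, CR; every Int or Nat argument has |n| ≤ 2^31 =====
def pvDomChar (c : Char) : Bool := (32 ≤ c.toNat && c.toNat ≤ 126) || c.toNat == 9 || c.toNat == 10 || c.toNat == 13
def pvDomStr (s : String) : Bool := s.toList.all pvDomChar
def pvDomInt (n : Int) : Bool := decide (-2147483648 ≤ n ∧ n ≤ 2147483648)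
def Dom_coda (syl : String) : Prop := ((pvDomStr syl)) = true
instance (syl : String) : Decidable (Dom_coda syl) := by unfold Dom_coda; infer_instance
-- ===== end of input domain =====

-- B replaces A's backward build-and-compare with a forward last-vowel index scan plus one slice (alternative decomposition, same cost).

-- ===== PORT A =====
def pvVowels : List Char := "aeiouɔ".toList

-- for char in syl[::-1]: if char not in "aeiouɔ": result = char + result; else: break
def codaLoopA : List Char → List Char → List Char
  | [], result => result
  | c :: rest, result =>
    if !pvVowels.contains c then codaLoopA rest (c :: result) else result

def coda (syl : String) : String :=
  let result := codaLoopA syl.toList.reverse []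
  if result = syl.toList then "" else String.ofList result

-- ===== PORT B =====
-- for i, ch in enumerate(syl): if ch in "aeiouɔ": last_vowel = i
def lastVowelAux : List Char → Int → Int → Int
  | [], _, last => last
  | c :: rest, i, last => lastVowelAux rest (i + 1) (if pvVowels.contains c then i else last)

def coda_alt (syl : String) : String :=
  let lv := lastVowelAux syl.toList 0 (-1)
  if lv = -1 then "" else String.ofList (PySem.List.slice syl.toList (some (lv + 1)) none)

-- ===== PRECONDITION & SPEC =====
def Spec_coda (syl : String) (out : String) : Prop := out = coda_alt syl
instance (syl : String) (out : String) : Decidable (Spec_coda syl out) := by unfold Spec_coda; infer_instance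

-- ===== CLAIM (what is proved, stated in full; the proofs are below) =====
def Claim_equal_coda : Prop := ∀ (syl : String), Dom_coda syl → Spec_coda syl (coda syl)

-- ===== LEMMAS AND PROOFS =====

theorem codaLoopA_eq (xs acc : List Char) :
    codaLoopA xs acc = (xs.takeWhile (fun c => !pvVowels.contains c)).reverse ++ acc := by
  induction xs generalizing acc with
  | nil => simp [codaLoopA]
  | cons c rest ih =>
    by_cases h : c ∈ pvVowels
    · simp [codaLoopA, h]
    · simp [codaLoopA, h, ih]

theorem lastVowelAux_no_vowel (xs : List Char) (i last : Int)
    (h : ∀ c ∈ xs, c ∉ pvVowels) : lastVowelAux xs i last = last := by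
  induction xs generalizing i last with
  | nil => rfl
  | cons c rest ih =>
    simp only [lastVowelAux]
    rw [if_neg (by simpa using h c (by simp))]
    exact ih _ _ (fun d hd => h d (by simp [hd]))

theorem lastVowelAux_append (xs ys : List Char) (i last : Int) :
    lastVowelAux (xs ++ ys) i last = lastVowelAux ys (i + xs.length) (lastVowelAux xs i last) := by
  induction xs generalizing i last with
  | nil => simp [lastVowelAux]
  | cons c rest ih =>
    simp only [List.cons_append, lastVowelAux, ih, List.length_cons]
    congr 1
    push_cast
    ring

-- main equivalence, over the character list
theorem coda_eq_alt (syl : String) : coda syl = coda_alt syl := by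
  unfold coda coda_alt
  set l := syl.toList with hl
  by_cases hv : ∀ c ∈ l, c ∉ pvVowels
  · -- no vowel anywhere: A's accumulated result is all of l, both return ""
    have hA : codaLoopA l.reverse [] = l := by
      rw [codaLoopA_eq, List.takeWhile_eq_self_iff.mpr ?_]
      · simp
      · intro c hc
        simp [hv c (by simpa using hc)]
    have hB : lastVowelAux l 0 (-1) = -1 := lastVowelAux_no_vowel l 0 (-1) hv
    simp [hA, hB]
  · -- a vowel occurs: split l = p ++ v :: s with v a vowel and s vowel-free
    push_neg at hv
    obtain ⟨c0, hc0, hc0v⟩ := hv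
    obtain ⟨v, rest, hd⟩ : ∃ v rest,
        l.reverse.dropWhile (fun c => !pvVowels.contains c) = v :: rest := by
      cases hdw : l.reverse.dropWhile (fun c => !pvVowels.contains c) with
      | nil =>
        rw [List.dropWhile_eq_nil_iff] at hdw
        have := hdw c0 (by simpa using hc0)
        simp at this
        exact absurd hc0v this
      | cons v rest => exact ⟨v, rest, rfl⟩
    have hvV : v ∈ pvVowels := by
      have := List.head?_dropWhile_not (fun c => !pvVowels.contains c) l.reverse
      rw [hd] at this
      simpa using this
    set t := l.reverse.takeWhile (fun c => !pvVowels.contains c) with ht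
    have hsplit : l = rest.reverse ++ v :: t.reverse := by
      have h2 : l.reverse = t ++ (v :: rest) := by
        rw [ht, ← hd, List.takeWhile_append_dropWhile]
      calc l = l.reverse.reverse := by simp
        _ = (t ++ v :: rest).reverse := by rw [h2]
        _ = rest.reverse ++ v :: t.reverse := by simp
    set p := rest.reverse with hp
    set s := t.reverse with hs
    have hsfree : ∀ c ∈ s, c ∉ pvVowels := by
      intro c hc
      have hct : c ∈ t := by simpa [hs] using hc
      have := List.mem_takeWhile_imp hct
      simpa using this
    -- A side
    have hA : codaLoopA l.reverse [] = s := by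
      rw [codaLoopA_eq, List.append_nil, ← ht]
    have hAne : s ≠ l := by
      intro h
      have := congrArg List.length h
      rw [hsplit] at this
      simp at this
      omega
    -- B side
    have hB : lastVowelAux l 0 (-1) = (p.length : Int) := by
      have h1 : l = (p ++ [v]) ++ s := by simp [hsplit, hp, hs]
      rw [h1, lastVowelAux_append, lastVowelAux_append,
        lastVowelAux_no_vowel s _ _ hsfree]
      simp [lastVowelAux, hvV]
    have hBne : (p.length : Int) ≠ -1 := by omega
    have hslice : PySem.List.slice l (some ((p.length : Int) + 1)) none = s := by
      have hc1 : ((p.length : Int) + 1) = ((p.length + 1 : ℕ) : Int) := by push_cast; ring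
      rw [hc1, PySem.List.slice_from_natCast, hsplit]
      rw [show rest.reverse ++ v :: t.reverse = (p ++ [v]) ++ s by simp [hp, hs]]
      rw [show p.length + 1 = (p ++ [v]).length by simp]
      exact List.drop_left
    simp only [hA, hB, hslice, if_neg hAne, if_neg hBne]

-- ===== VERDICT (by name: the statement is the Claim_ definition above) =====
theorem coda_spec : Claim_equal_coda := by
  intro syl _
  unfold Spec_coda
  exact coda_eq_alt syl
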